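-- pv_equiv track=rewrite | github.com/robbie-young/cs341 | ps02/enigma.py | modify_list_of_cycles
-- ===== SOURCE A (Python) =====
-- def combine_cycle_chains(list_of_cycles, cycle, i):
--     if cycle[0] == list_of_cycles[i][-1]:
--         cycle.insert(0, list_of_cycles[i][0])
--         list_of_cycles[i] = []
--     elif cycle[-1] == list_of_cycles[i][0]:
--         cycle.append(list_of_cycles[i][-1])
--         list_of_cycles[i] = []
--     return list_of_cycles, cycle
--
-- def remove_empty_lists(list_of_cycles):
--     while [] in list_of_cycles:
--         list_of_cycles.remove([])
--     return list_of_cycles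
--
-- def modify_list_of_cycles(cycles_list, list_of_cycles, cycle):
--     for j in range(len(list_of_cycles)):
--         i = 0
--         while i < len(list_of_cycles):
--             list_of_cycles, cycle = combine_cycle_chains(list_of_cycles, cycle, i)
--             i +=1
--         list_of_cycles = remove_empty_lists(list_of_cycles)
--     cycles_list.append(cycle)
--     return cycles_list, list_of_cycles
-- ===== SOURCE B (Python) =====
-- def modify_list_of_cycles(cycles_list, list_of_cycles, cycle):
--     # Fixpoint loop with early exit: one filtering pass per round instead of
--     # a fixed len(list_of_cycles) number of rounds of index-walk + repeated remove([]).
--     changed = True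
--     while changed:
--         changed = False
--         remaining = []
--         for chain in list_of_cycles:
--             if cycle[0] == chain[-1]:
--                 cycle.insert(0, chain[0])
--                 changed = True
--             elif cycle[-1] == chain[0]:
--                 cycle.append(chain[-1])
--                 changed = True
--             else:
--                 remaining.append(chain)
--         list_of_cycles = remaining
--     cycles_list.append(cycle)
--     return cycles_list, list_of_cycles
-- ===== Notes on version B (the rewrite author's own statement) =====
-- stated objective: alternative
-- what changed: A runs a fixed len(list_of_cycles) number of rounds, each an index-walk that blanks merged entries to [] and then repeatedly scans with 'remove([])'; B runs a single fixpoint loop that stops as soon as a pass merges nothing, each pass being one filtering traversal that never creates or removes empty placeholders.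
import Mathlib
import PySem

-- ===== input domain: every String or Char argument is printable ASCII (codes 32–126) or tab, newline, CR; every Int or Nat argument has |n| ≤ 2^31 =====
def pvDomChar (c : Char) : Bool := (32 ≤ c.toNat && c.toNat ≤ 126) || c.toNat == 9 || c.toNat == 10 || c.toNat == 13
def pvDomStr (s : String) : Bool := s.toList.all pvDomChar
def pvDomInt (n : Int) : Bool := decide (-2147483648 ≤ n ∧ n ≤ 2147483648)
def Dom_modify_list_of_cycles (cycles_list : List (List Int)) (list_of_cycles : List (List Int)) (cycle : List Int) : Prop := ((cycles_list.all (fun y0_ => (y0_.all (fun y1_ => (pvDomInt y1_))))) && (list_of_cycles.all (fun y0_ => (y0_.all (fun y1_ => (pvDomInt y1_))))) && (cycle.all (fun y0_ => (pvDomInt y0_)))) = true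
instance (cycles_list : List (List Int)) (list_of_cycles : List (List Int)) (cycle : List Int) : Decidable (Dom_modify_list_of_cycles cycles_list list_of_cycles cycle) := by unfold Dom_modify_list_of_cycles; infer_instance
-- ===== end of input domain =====

-- B replaces A's fixed number of blank-then-remove([]) rounds by a fixpoint loop of filtering
-- passes with early exit. Both Pythons mutate their list arguments in place
-- (A also empties/shrinks list_of_cycles, B does not); the equivalence proved here is about the
-- return value only.

-- ===== PORT A =====
-- cycle[0], cycle[-1], list_of_cycles[i][0], list_of_cycles[i][-1] are ported with
-- PySem.List.pyGetD (default never reached inside Pre_); 'list_of_cycles[i] = []' with List.set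
-- (exact for the in-range nonnegative i the while loop produces).
def combine_cycle_chains (list_of_cycles : List (List Int)) (cycle : List Int) (i : Nat) :
    List (List Int) × List Int :=
  let li := list_of_cycles.getD i []
  if PySem.List.pyGetD cycle 0 0 = PySem.List.pyGetD li (-1) 0 then
    (list_of_cycles.set i [], PySem.List.pyGetD li 0 0 :: cycle)
  else if PySem.List.pyGetD cycle (-1) 0 = PySem.List.pyGetD li 0 0 then
    (list_of_cycles.set i [], cycle ++ [PySem.List.pyGetD li (-1) 0])
  else (list_of_cycles, cycle)

-- 'while [] in list_of_cycles: list_of_cycles.remove([])'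
def remove_empty_lists (list_of_cycles : List (List Int)) : List (List Int) :=
  if h : [] ∈ list_of_cycles then
    remove_empty_lists ((PySem.List.remove? list_of_cycles ([] : List Int)).getD list_of_cycles)
  else list_of_cycles
termination_by list_of_cycles.length
decreasing_by
  rw [PySem.List.remove?_eq_some_erase list_of_cycles [] h]
  have := List.length_erase_of_mem h
  have := List.length_pos_of_mem h
  simp only [Option.getD_some]
  omega

theorem combine_length (loc : List (List Int)) (c : List Int) (i : Nat) :
    (combine_cycle_chains loc c i).1.length = loc.length := by
  unfold combine_cycle_chains; dsimp only; split_ifs <;> simp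

-- 'i = 0; while i < len(list_of_cycles): list_of_cycles, cycle = combine_cycle_chains(...); i += 1'
def while_combine (st : List (List Int) × List Int) (i : Nat) : List (List Int) × List Int :=
  if i < st.1.length then
    while_combine (combine_cycle_chains st.1 st.2 i) (i + 1)
  else st
termination_by st.1.length - i
decreasing_by rw [combine_length]; omega

def modify_list_of_cycles (cycles_list : List (List Int)) (list_of_cycles : List (List Int)) (cycle : List Int) : List (List Int) × List (List Int) :=
  let p := (List.range list_of_cycles.length).foldl
    (fun st _ =>
      let st' := while_combine st 0
      (remove_empty_lists st'.1, st'.2))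
    (list_of_cycles, cycle)
  (cycles_list ++ [p.2], p.1)

-- ===== PORT B =====
-- body of B's 'for chain in list_of_cycles' loop; state = (cycle, remaining, changed)
def pass_step (st : List Int × List (List Int) × Bool) (chain : List Int) :
    List Int × List (List Int) × Bool :=
  if PySem.List.pyGetD st.1 0 0 = PySem.List.pyGetD chain (-1) 0 then
    (PySem.List.pyGetD chain 0 0 :: st.1, st.2.1, true)
  else if PySem.List.pyGetD st.1 (-1) 0 = PySem.List.pyGetD chain 0 0 then
    (st.1 ++ [PySem.List.pyGetD chain (-1) 0], st.2.1, true)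
  else (st.1, st.2.1 ++ [chain], st.2.2)

-- one pass of B's while body
def pass_fold (cycle : List Int) (chains : List (List Int)) :
    List Int × List (List Int) × Bool :=
  chains.foldl pass_step (cycle, [], false)

theorem pass_fold_rem_le (l : List (List Int)) (c : List Int) (r0 : List (List Int)) (b0 : Bool) :
    (l.foldl pass_step (c, r0, b0)).2.1.length ≤ r0.length + l.length := by
  induction l generalizing c r0 b0 with
  | nil => simp
  | cons h t ih =>
    simp only [List.foldl_cons, pass_step]
    split_ifs
    · exact le_trans (ih _ _ _) (by simp)
    · exact le_trans (ih _ _ _) (by simp)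
    · exact le_trans (ih _ _ _) (by simp; omega)

theorem pass_fold_strict (l : List (List Int)) (c : List Int) (r0 : List (List Int)) :
    (l.foldl pass_step (c, r0, false)).2.2 = true →
    (l.foldl pass_step (c, r0, false)).2.1.length < r0.length + l.length := by
  induction l generalizing c r0 with
  | nil => simp
  | cons h t ih =>
    intro hch
    simp only [List.foldl_cons, pass_step] at hch ⊢
    split_ifs at hch ⊢
    · exact lt_of_le_of_lt (pass_fold_rem_le t _ r0 true) (by simp)
    · exact lt_of_le_of_lt (pass_fold_rem_le t _ r0 true) (by simp)
    · have := ih _ (r0 ++ [h]) hch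
      have hlen : (r0 ++ [h]).length + t.length = r0.length + (h :: t).length := by
        simp; omega
      omega

-- 'changed = True; while changed: …'
def fix_loop (cycle : List Int) (list_of_cycles : List (List Int)) :
    List Int × List (List Int) :=
  let r := pass_fold cycle list_of_cycles
  if h : r.2.2 = true then fix_loop r.1 r.2.1 else (r.1, r.2.1)
termination_by list_of_cycles.length
decreasing_by
  simpa using pass_fold_strict list_of_cycles cycle [] h

def modify_list_of_cycles_alt (cycles_list : List (List Int)) (list_of_cycles : List (List Int)) (cycle : List Int) : List (List Int) × List (List Int) :=
  let r := fix_loop cycle list_of_cycles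
  (cycles_list ++ [r.1], r.2)

-- ===== PRECONDITION & SPEC =====
-- Pre_ excludes exactly the inputs where Python A raises IndexError: an empty chain inside
-- list_of_cycles, or an empty cycle while list_of_cycles is nonempty (cycle[0] on []).
def Pre_modify_list_of_cycles (cycles_list : List (List Int)) (list_of_cycles : List (List Int)) (cycle : List Int) : Prop :=
  (∀ ch ∈ list_of_cycles, ch ≠ []) ∧ (list_of_cycles = [] ∨ cycle ≠ [])
instance (cycles_list : List (List Int)) (list_of_cycles : List (List Int)) (cycle : List Int) : Decidable (Pre_modify_list_of_cycles cycles_list list_of_cycles cycle) := by unfold Pre_modify_list_of_cycles; infer_instance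

def pvWitness_modify_list_of_cycles : List (List Int) × List (List Int) × List Int :=
  ([[0]], [[1, 2], [2, 3]], [3, 1])

def Spec_modify_list_of_cycles (cycles_list : List (List Int)) (list_of_cycles : List (List Int)) (cycle : List Int) (out : List (List Int) × List (List Int)) : Prop := out = modify_list_of_cycles_alt cycles_list list_of_cycles cycle
instance (cycles_list : List (List Int)) (list_of_cycles : List (List Int)) (cycle : List Int) (out : List (List Int) × List (List Int)) : Decidable (Spec_modify_list_of_cycles cycles_list list_of_cycles cycle out) := by unfold Spec_modify_list_of_cycles; infer_instance

-- ===== CLAIM (what is proved, stated in full; the proofs are below) =====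
def Claim_equal_modify_list_of_cycles : Prop := ∀ (cycles_list : List (List Int)) (list_of_cycles : List (List Int)) (cycle : List Int), Dom_modify_list_of_cycles cycles_list list_of_cycles cycle → Pre_modify_list_of_cycles cycles_list list_of_cycles cycle → Spec_modify_list_of_cycles cycles_list list_of_cycles cycle (modify_list_of_cycles cycles_list list_of_cycles cycle)

-- ===== LEMMAS AND PROOFS =====

theorem filter_erase_nil (l : List (List Int)) :
    (l.erase []).filter (fun x => x ≠ []) = l.filter (fun x => x ≠ []) := by
  induction l with
  | nil => simp
  | cons a t ih =>
    by_cases ha : a = ([] : List Int)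
    · subst ha; simp
    · rw [List.erase_cons_tail (by simpa using ha)]
      simpa [ha] using ih

theorem remove_empty_eq_filter (l : List (List Int)) :
    remove_empty_lists l = l.filter (fun x => x ≠ []) := by
  induction l using remove_empty_lists.induct with
  | case1 l h ih =>
    rw [remove_empty_lists]
    simp only [h, dite_true]
    rw [PySem.List.remove?_eq_some_erase l [] h] at ih ⊢
    simp only [Option.getD_some] at ih ⊢
    rw [ih, filter_erase_nil]
  | case2 l h =>
    rw [remove_empty_lists]
    simp only [h, dite_false]
    exact (List.filter_eq_self.mpr (fun a ha => by simpa using fun (e : a = []) => h (e ▸ ha))).symm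

-- A's one round (the while walk at the indices past p, then filtering the blanks)
-- equals B's one pass started on accumulator r0 = p.filter (· ≠ []).
theorem scan_eq (l p : List (List Int)) (c : List Int) (r0 : List (List Int)) (b0 : Bool)
    (hl : ∀ x ∈ l, x ≠ []) (hp : p.filter (fun x => x ≠ []) = r0) :
    (while_combine (p ++ l, c) p.length).2 = (l.foldl pass_step (c, r0, b0)).1 ∧
    (while_combine (p ++ l, c) p.length).1.filter (fun x => x ≠ []) =
      (l.foldl pass_step (c, r0, b0)).2.1 := by
  induction l generalizing p c r0 b0 with
  | nil =>
    rw [while_combine]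
    simp only [List.append_nil]
    rw [if_neg (by omega)]
    simp only [List.foldl_nil]
    simpa using hp
  | cons h t ih =>
    rw [while_combine]
    rw [if_pos (by simp)]
    have hli : (p ++ h :: t).getD p.length ([] : List Int) = h := by
      simp [List.getD]
    have hset : (p ++ h :: t).set p.length [] = p ++ ([] : List Int) :: t := by
      rw [List.set_append_right _ _ (Nat.le_refl _)]; simp
    simp only [List.foldl_cons]
    unfold combine_cycle_chains pass_step
    dsimp only
    rw [hli]
    have hlt : ∀ x ∈ t, x ≠ [] := fun x hx => hl x (List.mem_cons_of_mem _ hx)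
    split_ifs with h1 h2
    · rw [hset]
      have happ : p ++ ([] : List Int) :: t = (p ++ [([] : List Int)]) ++ t := by simp
      have hidx : p.length + 1 = (p ++ [([] : List Int)]).length := by simp
      rw [happ, hidx]
      exact ih (p ++ [[]]) _ r0 true hlt (by simpa using hp)
    · rw [hset]
      have happ : p ++ ([] : List Int) :: t = (p ++ [([] : List Int)]) ++ t := by simp
      have hidx : p.length + 1 = (p ++ [([] : List Int)]).length := by simp
      rw [happ, hidx]
      exact ih (p ++ [[]]) _ r0 true hlt (by simpa using hp)
    · have happ : p ++ h :: t = (p ++ [h]) ++ t := by simp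
      have hidx : p.length + 1 = (p ++ [h]).length := by simp
      rw [happ, hidx]
      exact ih (p ++ [h]) c (r0 ++ [h]) b0 hlt
        (by simp only [List.filter_append, hp]
            simpa using hl h List.mem_cons_self)

theorem pass_fold_true (l : List (List Int)) (c : List Int) (r0 : List (List Int)) :
    (l.foldl pass_step (c, r0, true)).2.2 = true := by
  induction l generalizing c r0 with
  | nil => rfl
  | cons h t ih =>
    simp only [List.foldl_cons, pass_step]
    split_ifs <;> exact ih _ _

-- B's pass with changed = false is the identity pass.
theorem pass_fold_id (l : List (List Int)) (c : List Int) (r0 : List (List Int)) :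
    (l.foldl pass_step (c, r0, false)).2.2 = false →
    l.foldl pass_step (c, r0, false) = (c, r0 ++ l, false) := by
  induction l generalizing c r0 with
  | nil => simp
  | cons h t ih =>
    intro hch
    simp only [List.foldl_cons, pass_step] at hch ⊢
    split_ifs at hch ⊢ with h1 h2
    · exact absurd (pass_fold_true t _ _) (by rw [hch]; simp)
    · exact absurd (pass_fold_true t _ _) (by rw [hch]; simp)
    · rw [ih _ _ hch]; simp

theorem pass_fold_mem (l : List (List Int)) (c : List Int) (r0 : List (List Int)) (b0 : Bool)
    (x : List Int) (hx : x ∈ (l.foldl pass_step (c, r0, b0)).2.1) : x ∈ r0 ∨ x ∈ l := by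
  induction l generalizing c r0 b0 with
  | nil => simp at hx; exact Or.inl hx
  | cons h t ih =>
    simp only [List.foldl_cons, pass_step] at hx
    split_ifs at hx
    · rcases ih _ _ _ hx with h' | h'
      · exact Or.inl h'
      · exact Or.inr (List.mem_cons_of_mem _ h')
    · rcases ih _ _ _ hx with h' | h'
      · exact Or.inl h'
      · exact Or.inr (List.mem_cons_of_mem _ h')
    · rcases ih _ _ _ hx with h' | h'
      · rcases List.mem_append.mp h' with h'' | h''
        · exact Or.inl h''
        · simp at h''; subst h''; exact Or.inr (List.mem_cons_self)
      · exact Or.inr (List.mem_cons_of_mem _ h')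

-- A's round as a function of the (loc, cycle) state.
def passA (st : List (List Int) × List Int) : List (List Int) × List Int :=
  (remove_empty_lists (while_combine st 0).1, (while_combine st 0).2)

theorem passA_eq_pass_fold (l : List (List Int)) (c : List Int) (hl : ∀ x ∈ l, x ≠ []) :
    passA (l, c) = ((pass_fold c l).2.1, (pass_fold c l).1) := by
  have h := scan_eq l [] c [] false hl (by simp)
  simp only [List.nil_append, List.length_nil] at h
  unfold passA pass_fold
  rw [remove_empty_eq_filter]
  exact Prod.ext h.2 h.1

theorem passA_id_iter (l : List (List Int)) (c : List Int) (hl : ∀ x ∈ l, x ≠ [])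
    (hch : (pass_fold c l).2.2 = false) (k : Nat) : passA^[k] (l, c) = (l, c) := by
  induction k with
  | zero => rfl
  | succ k ih =>
    have hid : passA (l, c) = (l, c) := by
      rw [passA_eq_pass_fold l c hl]
      have := pass_fold_id l c [] hch
      unfold pass_fold at this ⊢
      rw [this]; simp
    rw [Function.iterate_succ_apply, hid, ih]

theorem iter_eq_fix (m : Nat) : ∀ (l : List (List Int)) (c : List Int),
    (∀ x ∈ l, x ≠ []) → l.length ≤ m →
    passA^[m] (l, c) = ((fix_loop c l).2, (fix_loop c l).1) := by
  induction m with
  | zero =>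
    intro l c hl hlen
    have : l = [] := by simpa using List.length_eq_zero_iff.mp (Nat.le_zero.mp hlen)
    subst this
    rw [fix_loop]; simp [pass_fold]
  | succ m ih =>
    intro l c hl hlen
    by_cases hch : (pass_fold c l).2.2 = true
    · rw [fix_loop]; simp only [hch, dite_true]
      rw [Function.iterate_succ_apply, passA_eq_pass_fold l c hl]
      have hlt : (pass_fold c l).2.1.length < l.length := by
        simpa using pass_fold_strict l c [] hch
      exact ih _ _
        (fun x hx => by
          rcases pass_fold_mem l c [] false x hx with h | h
          · simp at h
          · exact hl x h)
        (by omega)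
    · replace hch : (pass_fold c l).2.2 = false := by simpa using hch
      rw [fix_loop]; simp only [hch]
      have hid := pass_fold_id l c [] hch
      unfold pass_fold at hid
      rw [passA_id_iter l c hl hch (m + 1)]
      unfold pass_fold
      rw [hid]; simp

theorem foldl_range_iterate {α : Type} (f : α → α) (n : Nat) (a : α) :
    (List.range n).foldl (fun st _ => f st) a = f^[n] a := by
  induction n generalizing a with
  | zero => rfl
  | succ n ih => rw [List.range_succ, List.foldl_append, ih, Function.iterate_succ_apply']
                 simp

-- ===== VERDICT (by name: the statement is the Claim_ definition above) =====
theorem modify_list_of_cycles_spec : Claim_equal_modify_list_of_cycles := by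
  intro cl loc cyc _ hpre
  unfold Spec_modify_list_of_cycles modify_list_of_cycles modify_list_of_cycles_alt
  have hfold : (List.range loc.length).foldl
      (fun st _ => let st' := while_combine st 0; (remove_empty_lists st'.1, st'.2))
      (loc, cyc) = passA^[loc.length] (loc, cyc) := by
    exact foldl_range_iterate passA loc.length (loc, cyc)
  rw [hfold, iter_eq_fix loc.length loc cyc hpre.1 (le_refl _)]
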